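-- pv_equiv track=rewrite | github.com/GitPistachio/Competitive-programming | ACQUIRE - Land Acquisition/Land Acquisition.py | minCostNaive
-- ===== SOURCE A (Python) =====
-- MAX_COST = 1000000000000
--
-- def minCostNaive(rectangles):
--     '''Time complexity O(n^2)'''
--
--     n = len(rectangles)
--     cost = [0]*(n + 1)
--
--     for i in range(1, n + 1):
--         cost[i] = MAX_COST
--         for j in range(i):
--             cost[i] = min(cost[i], cost[j] + rectangles[i - 1][0]*rectangles[j][1])
--
--     return cost[n]
-- ===== SOURCE B (Python) =====
-- MAX_COST = 1000000000000
--
-- def minCostNaive(rectangles):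
--     '''DP over pruned line set: for each height keep only the cheapest prefix
--     cost (lines with equal slope are dominated), scan distinct heights per step.'''
--     cur = 0            # cost of the empty prefix
--     best = {}          # height -> cheapest cost among prefixes ending before that height's rect
--     for rect in rectangles:
--         h = rect[1]
--         if h not in best or cur < best[h]:
--             best[h] = cur
--         x = rect[0]
--         cur = MAX_COST
--         for hh, c in best.items():
--             cur = min(cur, c + x * hh)
--     return cur
-- ===== Notes on version B (the rewrite author's own statement) =====
-- stated objective: faster
-- what changed: B replaces A's cost-array DP with an inner scan over all previous rectangles by an incrementally maintained dict of dominance-pruned lines (height -> cheapest prefix cost), so each step scans only the distinct heights seen so far.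
import Mathlib
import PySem

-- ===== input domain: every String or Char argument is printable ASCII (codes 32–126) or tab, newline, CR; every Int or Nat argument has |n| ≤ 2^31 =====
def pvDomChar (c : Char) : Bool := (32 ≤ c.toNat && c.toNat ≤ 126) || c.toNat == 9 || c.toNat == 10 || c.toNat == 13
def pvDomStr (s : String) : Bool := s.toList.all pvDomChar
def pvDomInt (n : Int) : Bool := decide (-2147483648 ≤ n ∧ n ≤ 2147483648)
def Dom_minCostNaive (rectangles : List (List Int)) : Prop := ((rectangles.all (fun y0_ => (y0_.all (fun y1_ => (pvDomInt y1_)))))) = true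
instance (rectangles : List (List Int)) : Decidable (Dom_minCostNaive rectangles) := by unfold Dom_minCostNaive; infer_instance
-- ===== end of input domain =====

-- B replaces A's cost-array DP (inner scan over all previous rectangles) by a dict of
-- dominance-pruned lines (height -> cheapest prefix cost); same return value on Pre_.


def MAXCOST : Int := 1000000000000

-- ===== PORT A =====
def minCostNaive (rectangles : List (List Int)) : Int :=
  let n := rectangles.length
  let cost := (List.range' 1 n).foldl
    (fun cost i =>
      cost.set i ((List.range i).foldl
        (fun ci j => min ci (cost.getD j 0 +
          (rectangles.getD (i - 1) []).getD 0 0 * (rectangles.getD j []).getD 1 0))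
        MAXCOST))
    (List.replicate (n + 1) 0)
  cost.getD n 0

-- ===== PORT B =====
def minCostNaive_alt (rectangles : List (List Int)) : Int :=
  (rectangles.foldl
    (fun (st : Int × PySem.Dict Int Int) rect =>
      let h := rect.getD 1 0
      let best :=
        match st.2.get? h with
        | none => st.2.insert h st.1
        | some c => if st.1 < c then st.2.insert h st.1 else st.2
      let x := rect.getD 0 0
      (best.items.foldl (fun cur p => min cur (p.2 + x * p.1)) MAXCOST, best))
    (0, PySem.Dict.empty)).1

-- ===== PRECONDITION & SPEC =====
-- Pre_ excludes exactly the inputs where the Python raises IndexError: a rectangle with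
-- fewer than two entries (both A and B index rect[0] and rect[1]).
def Pre_minCostNaive (rectangles : List (List Int)) : Prop :=
  ∀ r ∈ rectangles, 2 ≤ r.length
instance (rectangles : List (List Int)) : Decidable (Pre_minCostNaive rectangles) := by
  unfold Pre_minCostNaive; infer_instance

def pvWitness_minCostNaive : List (List Int) := [[100, 1], [15, 15], [20, 5], [1, 100]]

def Spec_minCostNaive (rectangles : List (List Int)) (out : Int) : Prop :=
  out = minCostNaive_alt rectangles
instance (rectangles : List (List Int)) (out : Int) : Decidable (Spec_minCostNaive rectangles out) := by
  unfold Spec_minCostNaive; infer_instance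

-- ===== CLAIM (what is proved, stated in full; the proofs are below) =====
def Claim_equal_minCostNaive : Prop := ∀ (rectangles : List (List Int)), Dom_minCostNaive rectangles → Pre_minCostNaive rectangles → Spec_minCostNaive rectangles (minCostNaive rectangles)

-- ===== LEMMAS AND PROOFS =====

-- the x- and h-coordinate of the j-th rectangle, as both ports read them
def pvX (xs : List (List Int)) (j : Nat) : Int := (xs.getD j []).getD 0 0
def pvH (xs : List (List Int)) (j : Nat) : Int := (xs.getD j []).getD 1 0

-- reference cost sequence: pvCl xs k = [cost 0, …, cost k] of the DP
def pvCl (xs : List (List Int)) : Nat → List Int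
  | 0 => [0]
  | k + 1 =>
    let cs := pvCl xs k
    cs ++ [((List.range (k + 1)).map
      (fun j => cs.getD j 0 + pvX xs k * pvH xs j)).foldl min MAXCOST]

def pvC (xs : List (List Int)) (k : Nat) : Int := (pvCl xs k).getD k 0

lemma pvCl_length (xs : List (List Int)) (k : Nat) : (pvCl xs k).length = k + 1 := by
  induction k with
  | zero => rfl
  | succ k ih => simp [pvCl, ih]

lemma pvCl_getD (xs : List (List Int)) {k j : Nat} (h : j ≤ k) :
    (pvCl xs k).getD j 0 = pvC xs j := by
  induction k with
  | zero => interval_cases j; rfl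
  | succ k ih =>
    rcases Nat.lt_or_ge j (k + 1) with hj | hj
    · rw [← ih (by omega)]
      simp only [pvCl]
      rw [List.getD_append _ _ _ _ (by rw [pvCl_length]; omega)]
    · have : j = k + 1 := by omega
      subst this; rfl

lemma pvC_succ (xs : List (List Int)) (k : Nat) :
    pvC xs (k + 1) =
      ((List.range (k + 1)).map (fun j => pvC xs j + pvX xs k * pvH xs j)).foldl min MAXCOST := by
  show (pvCl xs (k+1)).getD (k+1) 0 = _
  simp only [pvCl]
  rw [List.getD_append_right _ _ _ _ (by simp [pvCl_length])]
  rw [pvCl_length]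
  rw [Nat.sub_self, List.getD_cons_zero]
  have heq : ((List.range (k + 1)).map (fun j => (pvCl xs k).getD j 0 + pvX xs k * pvH xs j))
      = ((List.range (k + 1)).map (fun j => pvC xs j + pvX xs k * pvH xs j)) := by
    apply List.map_congr_left
    intro j hj
    rw [pvCl_getD xs (by simpa using Nat.lt_succ_iff.mp (List.mem_range.mp hj))]
  rw [heq]

-- running-min fold commutes with an extra element in the seed
lemma foldl_min_comm (l : List Int) : ∀ (init a : Int),
    l.foldl min (min init a) = min a (l.foldl min init) := by
  induction l with
  | nil => intro init a; simp [min_comm]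
  | cons b t ih =>
    intro init a
    simp only [List.foldl_cons]
    rw [show min (min init a) b = min (min init b) a by omega, ih]

lemma foldl_min_append_singleton (l : List Int) (init v : Int) :
    (l ++ [v]).foldl min init = min (l.foldl min init) v := by
  simp [List.foldl_append]

-- ===== A's port equals the reference sequence =====

def pvAstep (xs : List (List Int)) (cost : List Int) (i : Nat) : List Int :=
  cost.set i ((List.range i).foldl
    (fun ci j => min ci (cost.getD j 0 + pvX xs (i - 1) * pvH xs j)) MAXCOST)

lemma minCostNaive_eq_fold (xs : List (List Int)) :
    minCostNaive xs =
      ((List.range' 1 xs.length).foldl (pvAstep xs)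
        (List.replicate (xs.length + 1) 0)).getD xs.length 0 := rfl

lemma pvA_inv (xs : List (List Int)) : ∀ m : Nat, m ≤ xs.length →
    ((List.range' 1 m).foldl (pvAstep xs) (List.replicate (xs.length + 1) 0)).length
        = xs.length + 1 ∧
    ∀ k ≤ m, ((List.range' 1 m).foldl (pvAstep xs)
        (List.replicate (xs.length + 1) 0)).getD k 0 = pvC xs k := by
  intro m
  induction m with
  | zero =>
    intro _
    constructor
    · simp
    · intro k hk
      interval_cases k
      simp [List.getD, pvC, pvCl]
  | succ m ih =>
    intro hm
    obtain ⟨hlen, hval⟩ := ih (by omega)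
    have hconcat : List.range' 1 (m + 1) = List.range' 1 m ++ [1 + m] := by
      rw [List.range'_1_concat]
    set cs := (List.range' 1 m).foldl (pvAstep xs) (List.replicate (xs.length + 1) 0) with hcs
    rw [hconcat, List.foldl_append]
    simp only [List.foldl_cons, List.foldl_nil]
    have hstep : pvAstep xs cs (1 + m) = cs.set (m + 1)
        (((List.range (m + 1)).map (fun j => pvC xs j + pvX xs m * pvH xs j)).foldl min MAXCOST) := by
      unfold pvAstep
      have h1m : 1 + m = m + 1 := by omega
      rw [h1m]
      congr 1
      have : ((List.range (m + 1)).map (fun j => pvC xs j + pvX xs m * pvH xs j)).foldl min MAXCOST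
          = (List.range (m + 1)).foldl (fun ci j => min ci (pvC xs j + pvX xs m * pvH xs j)) MAXCOST := by
        rw [List.foldl_map]
      rw [this]
      apply PySem.List.foldl_congr_mem
      intro acc j hj
      have hj' : j < m + 1 := List.mem_range.mp hj
      rw [Nat.add_sub_cancel, hval j (by omega)]
    rw [hstep]
    refine ⟨by simp [hlen], ?_⟩
    intro k hk
    rcases Nat.lt_or_ge k (m + 1) with hklt | hkge
    · rw [List.getD_eq_getElem?_getD, List.getElem?_set_ne (by omega),
        ← List.getD_eq_getElem?_getD]
      exact hval k (by omega)
    · have hk1 : k = m + 1 := by omega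
      subst hk1
      rw [List.getD_eq_getElem _ _ (by rw [List.length_set, hlen]; omega)]
      rw [List.getElem_set_self (by rw [List.length_set, hlen]; omega)]
      rw [pvC_succ]

lemma minCostNaive_eq_pvC (xs : List (List Int)) :
    minCostNaive xs = pvC xs xs.length := by
  rw [minCostNaive_eq_fold]
  exact (pvA_inv xs xs.length le_rfl).2 xs.length le_rfl

-- ===== B's port equals the reference sequence =====

-- the un-pruned line set after k rectangles: pairs (height, cost)
def pvLines (xs : List (List Int)) (k : Nat) : List (Int × Int) :=
  (List.range k).map (fun j => (pvH xs j, pvC xs j))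

def pvQ (x : Int) (p : Int × Int) : Int := p.2 + x * p.1

-- B's loop invariant: cur is the current cost and the dict's items query like the full line set
def pvBinv (xs : List (List Int)) (k : Nat) (st : Int × PySem.Dict Int Int) : Prop :=
  st.1 = pvC xs k ∧ (PySem.Dict.keys st.2).Nodup ∧
  ∀ x init : Int, ((PySem.Dict.items st.2).map (pvQ x)).foldl min init
      = ((pvLines xs k).map (pvQ x)).foldl min init

def pvBstep (st : Int × PySem.Dict Int Int) (rect : List Int) : Int × PySem.Dict Int Int :=
  let h := rect.getD 1 0
  let best :=
    match st.2.get? h with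
    | none => st.2.insert h st.1
    | some c => if st.1 < c then st.2.insert h st.1 else st.2
  let x := rect.getD 0 0
  ((PySem.Dict.items best).foldl (fun cur p => min cur (p.2 + x * p.1)) MAXCOST, best)

lemma pvLines_succ (xs : List (List Int)) (k : Nat) :
    pvLines xs (k + 1) = pvLines xs k ++ [(pvH xs k, pvC xs k)] := by
  simp [pvLines, List.range_succ]

lemma pvLines_query (xs : List (List Int)) (k : Nat) (x init : Int) :
    ((pvLines xs (k + 1)).map (pvQ x)).foldl min init
      = min (((pvLines xs k).map (pvQ x)).foldl min init) (pvC xs k + x * pvH xs k) := by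
  rw [pvLines_succ]
  simp only [List.map_append, List.map_cons, List.map_nil]
  rw [foldl_min_append_singleton]
  rfl

lemma pvBstep_inv (xs : List (List Int)) (k : Nat) (rect : List Int)
    (hr : xs.getD k [] = rect) (st : Int × PySem.Dict Int Int)
    (hinv : pvBinv xs k st) : pvBinv xs (k + 1) (pvBstep st rect) := by
  obtain ⟨hcur, hnd, hq⟩ := hinv
  have hh : rect.getD 1 0 = pvH xs k := by rw [pvH, hr]
  have hx : rect.getD 0 0 = pvX xs k := by rw [pvX, hr]
  -- the new dict queries like pvLines (k+1)
  have hbest : ∀ best' : PySem.Dict Int Int,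
      best' = (match st.2.get? (rect.getD 1 0) with
        | none => st.2.insert (rect.getD 1 0) st.1
        | some c => if st.1 < c then st.2.insert (rect.getD 1 0) st.1 else st.2) →
      (PySem.Dict.keys best').Nodup ∧
      ∀ x init : Int, ((PySem.Dict.items best').map (pvQ x)).foldl min init
        = ((pvLines xs (k + 1)).map (pvQ x)).foldl min init := by
    intro best' hb
    rw [hh] at hb
    rcases hget : st.2.get? (pvH xs k) with _ | c
    · -- new key: items append
      rw [hget] at hb
      replace hb : best' = st.2.insert (pvH xs k) st.1 := hb
      have hnc : st.2.contains (pvH xs k) = false :=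
        (PySem.Dict.get?_eq_none_iff_contains _ _).mp hget
      constructor
      · rw [hb]; exact PySem.Dict.nodup_keys_insert _ _ _ hnd
      · intro x init
        rw [hb, PySem.Dict.items_insert_of_not_contains _ _ hnc]
        simp only [List.map_append, List.map_cons, List.map_nil]
        rw [foldl_min_append_singleton, hq, pvLines_query, hcur]
        rfl
    · rw [hget] at hb
      replace hb : best' = if st.1 < c then st.2.insert (pvH xs k) st.1 else st.2 := hb
      have hmem : (pvH xs k, c) ∈ PySem.Dict.items st.2 :=
        PySem.Dict.mem_items_of_get?_eq_some _ hget
      obtain ⟨s, t, hsplit⟩ := List.append_of_mem hmem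
      have hkeys : ((s ++ (pvH xs k, c) :: t).map Prod.fst).Nodup := by
        rw [← hsplit]; exact hnd
      have hs : ∀ p ∈ s, p.1 ≠ pvH xs k := by
        intro p hp hpe
        simp only [List.map_append, List.map_cons, List.nodup_append] at hkeys
        have hmem2 : p.1 ∈ List.map Prod.fst ((pvH xs k, c) :: t) := by
          simp [hpe]
        exact (hkeys.2.2 p.1 (List.mem_map_of_mem hp) p.1 hmem2) rfl
      have ht : ∀ p ∈ t, p.1 ≠ pvH xs k := by
        intro p hp hpe
        simp only [List.map_append, List.map_cons, List.nodup_append] at hkeys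
        have := hkeys.2.1
        simp only [List.nodup_cons] at this
        exact this.1 (by rw [← hpe]; exact List.mem_map_of_mem hp)
      -- query of the split list with value v at the hit
      have hqsplit : ∀ v x init : Int,
          ((s ++ (pvH xs k, v) :: t).map (pvQ x)).foldl min init
            = min (v + x * pvH xs k)
                ((t.map (pvQ x)).foldl min ((s.map (pvQ x)).foldl min init) ) := by
        intro v x init
        simp only [List.map_append, List.foldl_append, List.map_cons, List.foldl_cons]
        rw [show pvQ x (pvH xs k, v) = v + x * pvH xs k from rfl, foldl_min_comm]
      by_cases hlt : st.1 < c
      · -- replace in place with the cheaper cost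
        rw [if_pos hlt] at hb
        have hitems : PySem.Dict.items (st.2.insert (pvH xs k) st.1)
            = s ++ (pvH xs k, st.1) :: t := by
          rw [PySem.Dict.items_insert_of_contains _ _
              (by rw [PySem.Dict.contains_eq_isSome_get?, hget]; rfl), hsplit]
          rw [List.map_append, List.map_cons]
          congr 1
          · apply List.map_congr_left ?_ |>.trans (List.map_id s)
            intro p hp; simp [hs p hp]
          · congr 1
            · simp
            · apply List.map_congr_left ?_ |>.trans (List.map_id t)
              intro p hp; simp [ht p hp]
        constructor
        · rw [hb]; exact PySem.Dict.nodup_keys_insert _ _ _ hnd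
        · intro x init
          rw [hb, hitems, hqsplit, pvLines_query, ← hq x init, hsplit, hqsplit, hcur]
          omega
      · -- keep the existing cheaper line
        rw [if_neg hlt] at hb
        constructor
        · rw [hb]; exact hnd
        · intro x init
          rw [hb, pvLines_query, ← hq x init, hsplit, hqsplit]
          have hcle : c ≤ pvC xs k := by omega
          omega
  obtain ⟨hnd', hq'⟩ := hbest _ rfl
  refine ⟨?_, hnd', hq'⟩
  -- the new cur equals pvC xs (k+1)
  show ((PySem.Dict.items _).foldl (fun cur p => min cur (p.2 + rect.getD 0 0 * p.1)) MAXCOST) = _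
  rw [show (fun (cur : Int) (p : Int × Int) => min cur (p.2 + rect.getD 0 0 * p.1))
      = fun cur p => min cur (pvQ (rect.getD 0 0) p) from rfl, ← List.foldl_map]
  rw [hq', hx, pvC_succ]
  rw [pvLines, List.map_map]
  rfl

lemma pvB_fold (xs : List (List Int)) : ∀ (l : List (List Int)) (k : Nat)
    (st : Int × PySem.Dict Int Int), xs.drop k = l → pvBinv xs k st →
    (l.foldl pvBstep st).1 = pvC xs (k + l.length) := by
  intro l
  induction l with
  | nil => intro k st _ hinv; simpa using hinv.1
  | cons r l' ih =>
    intro k st hdrop hinv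
    have hk : k < xs.length := by
      by_contra hge
      rw [List.drop_eq_nil_of_le (by omega)] at hdrop
      simp at hdrop
    have hr : xs.getD k [] = r := by
      have hsome : xs[k]? = some r := by
        rw [← List.head?_drop, hdrop]
        rfl
      rw [List.getD_eq_getElem?_getD, hsome]
      rfl
    have hdrop' : xs.drop (k + 1) = l' := by
      have : (xs.drop k).tail = l' := by rw [hdrop]; rfl
      rwa [List.tail_drop] at this
    simp only [List.foldl_cons, List.length_cons]
    rw [show k + (l'.length + 1) = (k + 1) + l'.length by omega]
    exact ih (k + 1) (pvBstep st r) hdrop' (pvBstep_inv xs k r hr st hinv)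

lemma minCostNaive_alt_eq_pvC (xs : List (List Int)) :
    minCostNaive_alt xs = pvC xs xs.length := by
  have h0 : pvBinv xs 0 (0, PySem.Dict.empty) := by
    refine ⟨rfl, by simp [PySem.Dict.keys_empty], ?_⟩
    intro x init
    simp [pvLines]
    rfl
  have := pvB_fold xs xs 0 (0, PySem.Dict.empty) (by simp) h0
  simpa [minCostNaive_alt, pvBstep] using this

-- ===== VERDICT (by name: the statement is the Claim_ definition above) =====
theorem minCostNaive_spec : Claim_equal_minCostNaive := by
  intro xs _ _
  show minCostNaive xs = minCostNaive_alt xs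
  rw [minCostNaive_eq_pvC, minCostNaive_alt_eq_pvC]
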